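-- pv_equiv track=rewrite | github.com/julianazacharias/code-signal-courses | fundamental-interview-preparation-with-python/02-loops/02-while-conditional.py | solution
-- ===== SOURCE A (Python) =====
-- def solution(n):
--     resultado = 0
--     add_uma_casa = 1
--
--     while n > 0:
--         digito_sozinho = n % 10
--         resultado += digito_sozinho * add_uma_casa
--         add_uma_casa *= 10
--         resultado += digito_sozinho * add_uma_casa
--         add_uma_casa *= 10
--         n = n // 10
--
--     return resultado
-- ===== SOURCE B (Python) =====
-- def solution(n):
--     if n <= 0:
--         return 0
--     return solution(n // 10) * 100 + (n % 10) * 11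
-- ===== Notes on version B (the rewrite author's own statement) =====
-- stated objective: simpler
-- what changed: Replaces the iterative loop that accumulates a result together with an explicit place-value multiplier by a direct recursion on the number with its last digit removed, combining each doubled digit via a Horner step and using no mutable accumulators.
import Mathlib
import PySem

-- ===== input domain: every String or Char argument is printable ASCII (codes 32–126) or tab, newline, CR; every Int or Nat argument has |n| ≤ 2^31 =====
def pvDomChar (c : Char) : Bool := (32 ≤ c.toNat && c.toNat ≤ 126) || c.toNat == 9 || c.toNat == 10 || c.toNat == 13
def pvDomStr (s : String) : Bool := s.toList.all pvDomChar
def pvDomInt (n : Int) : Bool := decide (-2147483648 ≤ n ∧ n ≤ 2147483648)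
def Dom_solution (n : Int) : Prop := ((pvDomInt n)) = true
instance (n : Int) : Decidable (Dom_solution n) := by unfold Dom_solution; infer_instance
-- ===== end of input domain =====

-- B replaces A's loop with two accumulators by a direct Horner-style recursion on n // 10 (objective: simpler).
-- ===== PORT A =====
def solutionLoop (n resultado add_uma_casa : Int) : Int :=
  if _h : n > 0 then
    let digito := PySem.Int.mod n 10
    solutionLoop (PySem.Int.floordiv n 10)
      (resultado + digito * add_uma_casa + digito * (add_uma_casa * 10))
      (add_uma_casa * 10 * 10)
  else resultado
termination_by n.toNat
decreasing_by
  have h10 : (0:Int) < 10 := by norm_num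
  rw [PySem.Int.floordiv_eq_ediv_of_pos h10]
  omega

def solution (n : Int) : Int := solutionLoop n 0 1

-- ===== PORT B =====
def solution_alt (n : Int) : Int :=
  if _h : n ≤ 0 then 0
  else solution_alt (PySem.Int.floordiv n 10) * 100 + PySem.Int.mod n 10 * 11
termination_by n.toNat
decreasing_by
  have h10 : (0:Int) < 10 := by norm_num
  rw [PySem.Int.floordiv_eq_ediv_of_pos h10]
  omega

-- ===== PRECONDITION & SPEC =====
def Spec_solution (n : Int) (out : Int) : Prop := out = solution_alt n
instance (n : Int) (out : Int) : Decidable (Spec_solution n out) := by unfold Spec_solution; infer_instance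

-- ===== CLAIM (what is proved, stated in full; the proofs are below) =====
def Claim_equal_solution : Prop := ∀ (n : Int), Dom_solution n → Spec_solution n (solution n)

-- ===== LEMMAS AND PROOFS =====
lemma solutionLoop_eq (k : Nat) : ∀ (n res add : Int), n.toNat ≤ k →
    solutionLoop n res add = res + add * solution_alt n := by
  induction k with
  | zero =>
    intro n res add hk
    rw [solutionLoop, solution_alt]
    have hn : ¬ n > 0 := by omega
    simp [hn, show n ≤ 0 by omega]
  | succ k ih =>
    intro n res add hk
    rw [solutionLoop, solution_alt]
    by_cases hn : n > 0
    · have h10 : (0:Int) < 10 := by norm_num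
      have hq : PySem.Int.floordiv n 10 = n / 10 := PySem.Int.floordiv_eq_ediv_of_pos h10
      have hlt : (PySem.Int.floordiv n 10).toNat ≤ k := by rw [hq]; omega
      simp only [hn, show ¬ n ≤ 0 by omega, dif_pos, dif_neg, not_false_iff]
      rw [ih _ _ _ hlt]
      ring
    · simp [hn, show n ≤ 0 by omega]

-- ===== VERDICT (by name: the statement is the Claim_ definition above) =====
theorem solution_spec : Claim_equal_solution := by
  intro n _
  unfold Spec_solution solution
  rw [solutionLoop_eq n.toNat n 0 1 (le_refl _)]
  ring
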